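-- pv_equiv track=rewrite | github.com/isavita/advent_generated | python/day3_part1_2025.py | calc
-- ===== SOURCE A (Python) =====
-- def calc(s: str) -> int:
--     n = len(s)
--     suf = [-1] * (n + 1)
--     for i in range(n - 1, -1, -1):
--         c = s[i]
--         if '0' <= c <= '9':
--             d = ord(c) - 48
--             suf[i] = d if d > suf[i + 1] else suf[i + 1]
--         else:
--             suf[i] = suf[i + 1]
--     best = 0
--     for i in range(n - 1):
--         c = s[i]
--         if '0' <= c <= '9' and suf[i + 1] != -1:
--             d1 = ord(c) - 48
--             val = d1 * 10 + suf[i + 1]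
--             if val > best:
--                 best = val
--     return best
-- ===== SOURCE B (Python) =====
-- def calc(s: str) -> int:
--     best = 0
--     best_first = -1
--     for c in s:
--         if '0' <= c <= '9':
--             d = ord(c) - 48
--             if best_first >= 0:
--                 val = best_first * 10 + d
--                 if val > best:
--                     best = val
--             if d > best_first:
--                 best_first = d
--     return best
-- ===== Notes on version B (the rewrite author's own statement) =====
-- stated objective: simpler
-- what changed: Replaced A's suffix-max array plus a second indexed pairing pass with a single forward pass that maintains the best earlier digit seen so far (no auxiliary array).
import Mathlib
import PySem

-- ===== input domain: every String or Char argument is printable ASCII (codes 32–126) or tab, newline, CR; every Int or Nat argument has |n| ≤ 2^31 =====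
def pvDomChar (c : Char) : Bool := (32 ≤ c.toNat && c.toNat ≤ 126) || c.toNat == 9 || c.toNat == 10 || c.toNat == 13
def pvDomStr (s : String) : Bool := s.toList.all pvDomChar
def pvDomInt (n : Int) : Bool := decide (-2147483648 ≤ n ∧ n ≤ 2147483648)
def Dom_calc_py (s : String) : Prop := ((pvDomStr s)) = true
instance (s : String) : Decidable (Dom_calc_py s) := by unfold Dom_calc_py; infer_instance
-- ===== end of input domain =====

-- B replaces A's suffix-max array + second pairing pass by one forward pass tracking the best earlier digit (simpler).


-- ===== PORT A =====
-- '0' <= c <= '9'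
def pvIsDig (c : Char) : Bool := decide ('0' ≤ c) && decide (c ≤ '9')

-- ord(c) - 48
def pvDVal (c : Char) : Int := (c.toNat : Int) - 48

-- the suffix array `suf`: sufA l is [suf[i], suf[i+1], …, suf[n]] for the tail l of s;
-- built right-to-left exactly as A's first loop (suf[n] = -1; suf[i] from suf[i+1]).
def sufA : List Char → List Int
  | [] => [-1]
  | c :: rest =>
      let t := sufA rest
      let m := t.headD (-1)
      (if pvIsDig c then (if pvDVal c > m then pvDVal c else m) else m) :: t

-- A's second loop: at position i with tail c :: rest, suf[i+1] = (sufA rest).headD (-1);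
-- for the last index (rest = []) that head is -1 so the guard fails, matching range(n-1).
def bestA : List Char → Int → Int
  | [], b => b
  | c :: rest, b =>
      let sfx := (sufA rest).headD (-1)
      bestA rest (if pvIsDig c ∧ sfx ≠ -1 ∧ pvDVal c * 10 + sfx > b then pvDVal c * 10 + sfx else b)

def calc_py (s : String) : Int := bestA s.toList 0

-- ===== PORT B =====
-- one forward pass: bf = best digit seen so far (-1 if none), best = best pair value so far
def loopB : List Char → Int → Int → Int
  | [], _, best => best
  | c :: rest, bf, best =>
      if pvIsDig c then
        let d := pvDVal c
        let best' := if bf ≥ 0 ∧ bf * 10 + d > best then bf * 10 + d else best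
        loopB rest (if d > bf then d else bf) best'
      else loopB rest bf best

def calc_py_alt (s : String) : Int := loopB s.toList (-1) 0

-- ===== PRECONDITION & SPEC =====
def Spec_calc_py (s : String) (out : Int) : Prop := out = calc_py_alt s
instance (s : String) (out : Int) : Decidable (Spec_calc_py s out) := by unfold Spec_calc_py; infer_instance

-- ===== CLAIM (what is proved, stated in full; the proofs are below) =====
def Claim_equal_calc_py : Prop := ∀ (s : String), Dom_calc_py s → Spec_calc_py s (calc_py s)

-- ===== LEMMAS AND PROOFS =====

-- max digit of the tail (or -1), i.e. the head of the suffix array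
def mA (l : List Char) : Int := (sufA l).headD (-1)

theorem mA_nil : mA [] = -1 := rfl

theorem mA_cons (c : Char) (rest : List Char) :
    mA (c :: rest) = if pvIsDig c then (if pvDVal c > mA rest then pvDVal c else mA rest) else mA rest := rfl

theorem dVal_nonneg {c : Char} (h : pvIsDig c) : 0 ≤ pvDVal c := by
  simp only [pvIsDig, Bool.and_eq_true, decide_eq_true_eq] at h
  have : ('0' : Char).toNat ≤ c.toNat := h.1
  have h48 : ('0' : Char).toNat = 48 := by decide
  simp only [pvDVal]
  omega

theorem mA_ge (l : List Char) : -1 ≤ mA l := by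
  induction l with
  | nil => simp [mA_nil]
  | cons c rest ih =>
      rw [mA_cons]
      split_ifs with h1 h2
      · have := dVal_nonneg h1; omega
      · omega
      · omega

theorem bestA_cons (c : Char) (rest : List Char) (b : Int) :
    bestA (c :: rest) b =
      bestA rest (if pvIsDig c ∧ mA rest ≠ -1 ∧ pvDVal c * 10 + mA rest > b then pvDVal c * 10 + mA rest else b) := rfl

-- main invariant: B's pass equals A's pass, once the pending pairing of bf with the
-- best digit of the remaining tail is folded into the accumulator
theorem loop_eq (l : List Char) : ∀ (bf b : Int), -1 ≤ bf →
    loopB l bf b = bestA l (if bf ≥ 0 ∧ mA l ≥ 0 ∧ bf * 10 + mA l > b then bf * 10 + mA l else b) := by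
  induction l with
  | nil =>
      intro bf b _
      have : ¬ (bf ≥ 0 ∧ mA [] ≥ 0 ∧ bf * 10 + mA [] > b) := by
        rw [mA_nil]; omega
      simp [loopB, bestA, this]
  | cons c rest ih =>
      intro bf b hbf
      have hm := mA_ge rest
      by_cases hd : pvIsDig c
      · have hd0 := dVal_nonneg hd
        rw [bestA_cons]
        simp only [loopB, if_pos hd]
        rw [ih (if pvDVal c > bf then pvDVal c else bf)
              (if bf ≥ 0 ∧ bf * 10 + pvDVal c > b then bf * 10 + pvDVal c else b)
              (by split_ifs <;> omega)]
        rw [mA_cons, if_pos hd]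
        simp only [iff_true_intro hd, true_and]
        congr 1
        split_ifs <;> omega
      · rw [bestA_cons]
        simp only [loopB, if_neg hd]
        rw [mA_cons, if_neg hd]
        rw [ih bf b hbf]
        congr 1
        split_ifs with h1 h2 <;> simp_all

-- ===== VERDICT (by name: the statement is the Claim_ definition above) =====
theorem calc_py_spec : Claim_equal_calc_py := by
  intro s _
  unfold Spec_calc_py calc_py calc_py_alt
  rw [loop_eq s.toList (-1) 0 (by omega)]
  have : ¬ ((-1 : Int) ≥ 0 ∧ mA s.toList ≥ 0 ∧ (-1) * 10 + mA s.toList > 0) := by omega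
  rw [if_neg this]
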